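-- pv_equiv track=rewrite | github.com/Sid-MB/WebScrapping-PoetryFoundation | csv to excel.py | last_two
-- ===== SOURCE A (Python) =====
-- def last_two(content: str) -> str:
-- 	if not isinstance(content, str):
-- 		return last_two(str(content))
--
-- 	lines = list(map(lambda x: x.strip(), content.split("\n")))
-- 	lines = [l for l in lines if ("✷" not in l)]
-- 	lines = [l for l in lines if l]  # remove empty lines
--
-- 	if len(lines) < 2:
-- 		return "nan"
--
-- 	return "  /  ".join(lines[-2:]).strip()
-- ===== SOURCE B (Python) =====
-- def last_two(content: str) -> str:
-- 	if not isinstance(content, str):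
-- 		return last_two(str(content))
--
-- 	first = None
-- 	for raw in reversed(content.split("\n")):
-- 		line = raw.strip()
-- 		if line and "✷" not in line:
-- 			if first is None:
-- 				first = line
-- 			else:
-- 				return "  /  ".join([line, first])
-- 	return "nan"
-- ===== Notes on version B (the rewrite author's own statement) =====
-- stated objective: alternative
-- what changed: Replaces A's four forward passes (map-strip, two filter list comprehensions, slice [-2:] + join + final strip) with a single reverse scan that strips and tests each line, keeps at most two survivors, and returns as soon as the second is found; the final strip is dropped as provably redundant.
import Mathlib
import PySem

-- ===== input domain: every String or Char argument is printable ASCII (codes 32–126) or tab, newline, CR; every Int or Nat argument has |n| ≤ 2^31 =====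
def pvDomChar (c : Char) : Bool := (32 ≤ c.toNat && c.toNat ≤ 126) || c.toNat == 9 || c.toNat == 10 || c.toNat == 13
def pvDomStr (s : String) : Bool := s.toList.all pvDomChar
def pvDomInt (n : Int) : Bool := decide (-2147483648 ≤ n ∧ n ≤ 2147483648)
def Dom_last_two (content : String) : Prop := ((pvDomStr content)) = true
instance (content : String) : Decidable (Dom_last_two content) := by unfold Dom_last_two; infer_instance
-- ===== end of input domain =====

-- B replaces A's three forward passes (map-strip, two filters, slice [-2:], join, strip)
-- by a single reverse scan that collects the last two surviving lines and stops early.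


-- ===== PORT A =====
-- content is always a str under the type convention, so the isinstance branch is never taken.
def last_two (content : String) : String :=
  let lines := ((PySem.Str.split? content "\n").getD []).map (fun x => PySem.Str.strip x)
  let lines2 := lines.filter (fun l => !(PySem.Str.isIn "✷" l))
  let lines3 := lines2.filter (fun l => !(l == ""))   -- Python truthiness: keep non-empty
  if lines3.length < 2 then "nan"
  else PySem.Str.strip (PySem.Str.join "  /  " (PySem.List.slice lines3 (some (-2)) none))

-- ===== PORT B =====
-- B's loop: scan the split lines back to front, keep the first two survivors, stop early.
def lastTwoGo : List String → Option String → String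
  | [], _ => "nan"
  | raw :: rest, first? =>
    let line := PySem.Str.strip raw
    if !(line == "") && !(PySem.Str.isIn "✷" line) then
      match first? with
      | none => lastTwoGo rest (some line)
      | some f => PySem.Str.join "  /  " [line, f]
    else lastTwoGo rest first?

def last_two_alt (content : String) : String :=
  lastTwoGo (((PySem.Str.split? content "\n").getD []).reverse) none

-- ===== PRECONDITION & SPEC =====
def Spec_last_two (content : String) (out : String) : Prop := out = last_two_alt content
instance (content : String) (out : String) : Decidable (Spec_last_two content out) := by unfold Spec_last_two; infer_instance

-- ===== CLAIM (what is proved, stated in full; the proofs are below) =====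
def Claim_equal_last_two : Prop := ∀ (content : String), Dom_last_two content → Spec_last_two content (last_two content)

-- ===== LEMMAS AND PROOFS =====

-- the surviving-line predicate
def pvKeep (l : String) : Bool := !(l == "") && !(PySem.Str.isIn "✷" l)

-- what B's loop computes, as a function of the filtered (reversed) list
def pvGoSpec : List String → Option String → String
  | [], _ => "nan"
  | [_], none => "nan"
  | a :: b :: _, none => PySem.Str.join "  /  " [b, a]
  | b :: _, some f => PySem.Str.join "  /  " [b, f]

theorem pvGo_spec (ls : List String) (o : Option String) :
    lastTwoGo ls o = pvGoSpec ((ls.map PySem.Str.strip).filter pvKeep) o := by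
  induction ls generalizing o with
  | nil => cases o <;> rfl
  | cons raw rest ih =>
    simp only [lastTwoGo, List.map_cons, List.filter_cons]
    have hk : (!(PySem.Str.strip raw == "") && !(PySem.Str.isIn "✷" (PySem.Str.strip raw)))
        = pvKeep (PySem.Str.strip raw) := rfl
    rw [hk]
    by_cases h : pvKeep (PySem.Str.strip raw) = true
    · rw [if_pos h, if_pos h]
      cases o with
      | none =>
        rw [ih]
        cases hf : (rest.map PySem.Str.strip).filter pvKeep with
        | nil => rfl
        | cons hd tl => cases tl <;> rfl
      | some f =>
        cases hf : (rest.map PySem.Str.strip).filter pvKeep with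
        | nil => rfl
        | cons hd tl => cases tl <;> rfl
    · rw [if_neg h, if_neg h]
      exact ih o

-- strip facts ---------------------------------------------------------------

theorem pv_rstrip_prefix (y : List Char) : PySem.Chars.rstrip y <+: y := by
  have h := List.dropWhile_suffix (p := PySem.Chars.isspace) (l := y.reverse)
  have h2 := List.reverse_prefix.mpr h
  simpa [PySem.Chars.rstrip] using h2

theorem pv_strip_head {cs : List Char} {d : Char} {ds : List Char}
    (h : PySem.Chars.strip cs = d :: ds) : PySem.Chars.isspace d = false := by
  have hpre : PySem.Chars.strip cs <+: PySem.Chars.lstrip cs := by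
    simpa [PySem.Chars.strip] using pv_rstrip_prefix (PySem.Chars.lstrip cs)
  have hhead : (PySem.Chars.lstrip cs).head? = some d := by
    obtain ⟨t, ht⟩ := hpre
    rw [← ht, h]; rfl
  have hdw := List.head?_dropWhile_not PySem.Chars.isspace cs
  rw [show List.dropWhile PySem.Chars.isspace cs = PySem.Chars.lstrip cs from rfl, hhead] at hdw
  exact hdw

theorem pv_strip_last {cs : List Char} {d : Char} {ds : List Char}
    (h : (PySem.Chars.strip cs).reverse = d :: ds) : PySem.Chars.isspace d = false := by
  have heq : (PySem.Chars.strip cs).reverse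
      = List.dropWhile PySem.Chars.isspace (PySem.Chars.lstrip cs).reverse := by
    simp [PySem.Chars.strip, PySem.Chars.rstrip]
  rw [heq] at h
  have hdw := List.head?_dropWhile_not PySem.Chars.isspace (PySem.Chars.lstrip cs).reverse
  rw [h] at hdw
  exact hdw

-- stripping a string whose first and last characters are non-space is a no-op
theorem pv_strip_noop {x : List Char} {c d : Char} {cs : List Char}
    (hx : x = c :: cs) (hc : PySem.Chars.isspace c = false)
    (hr : ∃ es, x.reverse = d :: es) (hd : PySem.Chars.isspace d = false) :
    PySem.Chars.strip x = x := by
  obtain ⟨es, hes⟩ := hr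
  have hl : PySem.Chars.lstrip x = x := by
    rw [PySem.Chars.lstrip, hx, List.dropWhile_cons, if_neg (by simp [hc])]
  have hrr : PySem.Chars.rstrip x = x := by
    rw [PySem.Chars.rstrip, hes, List.dropWhile_cons, if_neg (by simp [hd]), ← hes,
      List.reverse_reverse]
  rw [PySem.Chars.strip, hl, hrr]

-- a non-empty stripped string starts and ends with non-space characters
theorem pv_stripped_shape (raw : String) (h : ¬ PySem.Str.strip raw = "") :
    (∃ c cs, (PySem.Str.strip raw).toList = c :: cs ∧ PySem.Chars.isspace c = false) ∧
    (∃ d ds, (PySem.Str.strip raw).toList.reverse = d :: ds ∧ PySem.Chars.isspace d = false) := by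
  have hne : (PySem.Str.strip raw).toList ≠ [] := by
    intro hc
    exact h (String.toList_inj.mp (by rw [hc]; rfl))
  constructor
  · cases hl : (PySem.Str.strip raw).toList with
    | nil => exact absurd hl hne
    | cons c cs =>
      refine ⟨c, cs, rfl, ?_⟩
      have h2 : PySem.Chars.strip raw.toList = c :: cs := by
        rw [← PySem.Str.toList_strip, hl]
      exact pv_strip_head h2
  · cases hl : (PySem.Str.strip raw).toList.reverse with
    | nil =>
      exfalso
      exact hne (by simpa using congrArg List.reverse hl)
    | cons d ds =>
      refine ⟨d, ds, rfl, ?_⟩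
      have h2 : (PySem.Chars.strip raw.toList).reverse = d :: ds := by
        rw [← PySem.Str.toList_strip, hl]
      exact pv_strip_last h2

-- the final .strip() in A is a no-op on the joined survivors
theorem pv_strip_join (b a : String)
    (hb : ∃ rb, b = PySem.Str.strip rb) (ha : ∃ ra, a = PySem.Str.strip ra)
    (hbne : ¬ b = "") (hane : ¬ a = "") :
    PySem.Str.strip (PySem.Str.join "  /  " [b, a]) = PySem.Str.join "  /  " [b, a] := by
  obtain ⟨rb, rfl⟩ := hb
  obtain ⟨ra, rfl⟩ := ha
  obtain ⟨⟨c, cs, hbc, hcns⟩, -⟩ := pv_stripped_shape rb hbne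
  obtain ⟨-, ⟨d, ds, had, hdns⟩⟩ := pv_stripped_shape ra hane
  have hjoin : (PySem.Str.join "  /  " [PySem.Str.strip rb, PySem.Str.strip ra]).toList
      = (PySem.Str.strip rb).toList ++ ("  /  ".toList ++ (PySem.Str.strip ra).toList) := by
    simp [PySem.Str.toList_join, PySem.Chars.join, List.intercalate]
  have hx : (PySem.Str.join "  /  " [PySem.Str.strip rb, PySem.Str.strip ra]).toList
      = c :: (cs ++ ("  /  ".toList ++ (PySem.Str.strip ra).toList)) := by
    rw [hjoin, hbc]; simp
  have hrx : (PySem.Str.join "  /  " [PySem.Str.strip rb, PySem.Str.strip ra]).toList.reverse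
      = d :: (ds ++ ("  /  ".toList.reverse ++ (PySem.Str.strip rb).toList.reverse)) := by
    rw [hjoin]
    simp only [List.reverse_append, had]
    simp
  have hno := pv_strip_noop hx hcns ⟨_, hrx⟩ hdns
  rw [← String.toList_inj, PySem.Str.toList_strip, hno]

-- A's two filters equal one filter by pvKeep
theorem pv_filters (xs : List String) :
    (xs.filter (fun l => !(PySem.Str.isIn "✷" l))).filter (fun l => !(l == ""))
      = xs.filter pvKeep := by
  rw [List.filter_filter]
  exact List.filter_congr (fun x _ => by simp [pvKeep])

-- main bridge, for an arbitrary split result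
theorem pv_main (ls : List String) :
    (let lines3 := ((ls.map (fun x => PySem.Str.strip x)).filter
        (fun l => !(PySem.Str.isIn "✷" l))).filter (fun l => !(l == ""));
      if lines3.length < 2 then "nan"
      else PySem.Str.strip (PySem.Str.join "  /  " (PySem.List.slice lines3 (some (-2)) none)))
    = lastTwoGo ls.reverse none := by
  rw [pvGo_spec]
  simp only [pv_filters, List.map_reverse, List.filter_reverse]
  set L := (ls.map (fun x => PySem.Str.strip x)).filter pvKeep with hL
  cases hrev : L.reverse with
  | nil =>
    have hLnil : L = [] := by simpa using congrArg List.reverse hrev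
    simp [hLnil, pvGoSpec]
  | cons a t =>
    cases ht : t with
    | nil =>
      have hLone : L = [a] := by
        have := congrArg List.reverse hrev
        simpa [ht] using this
      simp [hLone, pvGoSpec]
    | cons b t2 =>
      have hLeq : L = t2.reverse ++ [b, a] := by
        have := congrArg List.reverse hrev
        simpa [ht] using this
      have hlen : L.length = t2.length + 2 := by simp [hLeq]
      have hslice : PySem.List.slice L (some (-2)) none = [b, a] := by
        rw [PySem.List.slice_from_neg_ofNat L 2 (by omega), hLeq]
        simp
      have hmem : ∀ x ∈ L, (∃ r, x = PySem.Str.strip r) ∧ ¬ x = "" := by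
        intro x hx
        rw [hL] at hx
        have hk := List.of_mem_filter hx
        have hm := List.mem_of_mem_filter hx
        obtain ⟨r, _, hr⟩ := List.mem_map.mp hm
        refine ⟨⟨r, hr.symm⟩, ?_⟩
        simp [pvKeep] at hk
        exact hk.1
      have hbL : b ∈ L := by rw [hLeq]; simp
      have haL : a ∈ L := by rw [hLeq]; simp
      rw [if_neg (by omega), hslice,
        pv_strip_join b a (hmem b hbL).1 (hmem a haL).1 (hmem b hbL).2 (hmem a haL).2]
      rfl

-- ===== VERDICT (by name: the statement is the Claim_ definition above) =====
theorem last_two_spec : Claim_equal_last_two := by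
  intro content _
  unfold Spec_last_two last_two last_two_alt
  exact pv_main ((PySem.Str.split? content "\n").getD [])
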